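-- pv_equiv track=rewrite | github.com/Klaudia1303/student_code_analysis | Progetto-tirocinio2024/data/student_data/2065099_Mastrantonio/LabPython07/A_Ex9.py | A_Ex9
-- ===== SOURCE A (Python) =====
-- def A_Ex9(l):
--     for i in range (len(l)):
--         parola = l[i]
--         contamax = 0
--         conta = 0
--         for j in range (len(parola)):
--             conta = parola.count(parola[j])
--             if conta > contamax :
--                 contamax = conta
--                 l[i] = str(parola[j])
--             elif conta == contamax :
--                 if ord(parola[j])<ord(l[i]):
--                     contamax = conta
--                     l[i] = str(parola[j])
--     return(l)
-- ===== SOURCE B (Python) =====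
-- # B: for each non-empty word, build a character-frequency table once, then pick
-- # the best character with a single min() over the distinct keys (most frequent,
-- # smallest on ties).  Mutates l in place like A and returns it.
-- def A_Ex9(l):
--     for i, word in enumerate(l):
--         if word:
--             counts = {}
--             for ch in word:
--                 counts[ch] = counts.get(ch, 0) + 1
--             l[i] = min(counts, key=lambda c: (-counts[c], c))
--     return l
-- ===== Notes on version B (the rewrite author's own statement) =====
-- stated objective: idiomatic
-- what changed: A rescans the word with parola.count() for every character and updates a running best via compare-and-replace; B builds a frequency table in one pass and then selects the answer with a single min() with key (-count, char) over the distinct characters.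
import Mathlib
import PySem

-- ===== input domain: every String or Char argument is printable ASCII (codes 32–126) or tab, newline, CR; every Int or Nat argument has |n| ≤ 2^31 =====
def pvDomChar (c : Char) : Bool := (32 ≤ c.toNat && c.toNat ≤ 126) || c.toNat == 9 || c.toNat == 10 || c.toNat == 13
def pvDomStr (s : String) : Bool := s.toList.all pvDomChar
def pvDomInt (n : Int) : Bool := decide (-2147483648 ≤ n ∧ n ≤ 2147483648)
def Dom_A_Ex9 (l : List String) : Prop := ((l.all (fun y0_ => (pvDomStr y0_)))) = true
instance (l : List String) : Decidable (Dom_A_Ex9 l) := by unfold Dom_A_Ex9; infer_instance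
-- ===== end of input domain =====

-- B replaces A's per-character running-best update with: build a frequency table once,
-- then one min() over the distinct characters (objective: idiomatic).  In Python both A
-- and B mutate the caller's list in place; the theorem is about the returned value,
-- which is also the final state of that list.

-- ===== PORT A =====
-- ord(s) for the length-1 strings A applies it to (Python's ord raises on other
-- strings; here every compared value is a 1-character string).
def pyOrd (s : String) : Int := ((s.toList.getD 0 default).toNat : Int)

-- the body of A's inner 'for j in range(len(parola))' loop; state = (contamax, l)
def A_Ex9_innerBody (parola : String) (i : Int) (st : Int × List String) (j : Int) : Int × List String :=
  let cj : Char := (PySem.Str.pyGet? parola j).getD default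
  let conta : Int := (PySem.Str.count parola (String.singleton cj) : Int)
  if conta > st.1 then
    (conta, PySem.List.pySetD st.2 i (String.singleton cj))
  else if conta == st.1 then
    if pyOrd (String.singleton cj) < pyOrd (PySem.List.pyGetD st.2 i "") then
      (conta, PySem.List.pySetD st.2 i (String.singleton cj))
    else st
  else st

-- the body of A's outer 'for i in range(len(l))' loop
def A_Ex9_outerBody (acc : List String) (i : Int) : List String :=
  let parola := PySem.List.pyGetD acc i ""
  let st := (PySem.List.pyRange 0 (PySem.Str.len parola) 1).foldl (A_Ex9_innerBody parola i) (0, acc)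
  st.2

def A_Ex9 (l : List String) : List String :=
  (PySem.List.pyRange 0 (l.length : Int) 1).foldl A_Ex9_outerBody l

-- ===== PORT B =====
def A_Ex9_alt (l : List String) : List String :=
  l.map (fun word =>
    if word = "" then word
    else
      let counts : PySem.Dict Char Int :=
        word.toList.foldl (fun d ch => d.insert ch (d.getD ch 0 + 1)) PySem.Dict.empty
      match PySem.List.min2? counts.keys (fun c => -(counts.getD c 0)) (fun c => c) with
      | some c => String.singleton c
      | none => word)

-- ===== PRECONDITION & SPEC =====
def Spec_A_Ex9 (l : List String) (out : List String) : Prop := out = A_Ex9_alt l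
instance (l : List String) (out : List String) : Decidable (Spec_A_Ex9 l out) := by unfold Spec_A_Ex9; infer_instance

-- ===== CLAIM (what is proved, stated in full; the proofs are below) =====
def Claim_equal_A_Ex9 : Prop := ∀ (l : List String), Dom_A_Ex9 l → Spec_A_Ex9 l (A_Ex9 l)

-- ===== LEMMAS AND PROOFS =====

-- Str.count with a single-character needle is the character count.
theorem count_go_single (c : Char) : ∀ (s : List Char) (fuel acc : Nat), s.length ≤ fuel →
    PySem.Chars.count.go [c] fuel s acc = acc + s.count c := by
  intro s
  induction s with
  | nil => intro fuel acc _; cases fuel <;> simp [PySem.Chars.count.go]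
  | cons h t ih =>
    intro fuel acc hf
    cases fuel with
    | zero => simp at hf
    | succ n =>
      have ht : t.length ≤ n := by simp at hf; omega
      by_cases hc : c = h
      · subst hc
        simp only [PySem.Chars.count.go, List.isPrefixOf, List.length_cons] at *
        simp [ih n (acc+1) ht]
        omega
      · simp only [PySem.Chars.count.go] at *
        have hpf : List.isPrefixOf [c] (h :: t) = false := by
          simp [List.isPrefixOf]; exact fun hh => hc hh
        simp [hpf, ih n acc ht, Ne.symm hc]

theorem str_count_singleton (w : String) (c : Char) :
    PySem.Str.count w (String.singleton c) = w.toList.count c := by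
  rw [PySem.Str.count_eq]
  have h1 : (String.singleton c).toList = [c] := by simp [String.singleton]
  rw [h1]
  simp only [PySem.Chars.count, List.isEmpty_cons]
  simpa using count_go_single c w.toList w.toList.length 0 le_rfl

theorem char_lt_iff (c b : Char) : c < b ↔ c.toNat < b.toNat := by
  rw [Char.lt_def]; exact UInt32.lt_iff_toNat_lt

theorem ord_singleton (c : Char) : pyOrd (String.singleton c) = (c.toNat : Int) := by
  simp [pyOrd, String.singleton]

-- the selection order both programs implement: larger count first, then smaller character
def KeyLe (cs : List Char) (a b : Char) : Prop :=
  cs.count b < cs.count a ∨ (cs.count a = cs.count b ∧ a ≤ b)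

def pick (cs : List Char) (b c : Char) : Char :=
  if cs.count b < cs.count c then c
  else if cs.count c = cs.count b ∧ c < b then c else b

theorem keyle_trans (cs : List Char) {a b c : Char}
    (h1 : KeyLe cs a b) (h2 : KeyLe cs b c) : KeyLe cs a c := by
  rcases h1 with h1 | ⟨h1, h1'⟩ <;> rcases h2 with h2 | ⟨h2, h2'⟩ <;>
    simp only [KeyLe] <;> first
      | (left; omega)
      | (right; exact ⟨by omega, le_trans h1' h2'⟩)

theorem pick_spec (cs : List Char) : ∀ (t : List Char) (b : Char),
    (t.foldl (pick cs) b = b ∨ t.foldl (pick cs) b ∈ t) ∧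
    ∀ c, (c = b ∨ c ∈ t) → KeyLe cs (t.foldl (pick cs) b) c := by
  intro t
  induction t with
  | nil =>
    intro b
    refine ⟨Or.inl rfl, ?_⟩
    rintro c hc
    rcases hc with rfl | h
    · exact Or.inr ⟨rfl, le_refl _⟩
    · simp at h
  | cons x t ih =>
    intro b
    have hb : KeyLe cs (pick cs b x) b ∧ KeyLe cs (pick cs b x) x ∧ (pick cs b x = b ∨ pick cs b x = x) := by
      unfold pick KeyLe
      split_ifs with h1 h2
      · exact ⟨Or.inl h1, Or.inr ⟨rfl, le_refl _⟩, Or.inr rfl⟩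
      · exact ⟨Or.inr ⟨h2.1, le_of_lt h2.2⟩, Or.inr ⟨rfl, le_refl _⟩, Or.inr rfl⟩
      · refine ⟨Or.inr ⟨rfl, le_refl _⟩, ?_, Or.inl rfl⟩
        rcases Nat.lt_or_ge (cs.count x) (cs.count b) with h | h
        · exact Or.inl h
        · have hbc : cs.count b = cs.count x := by omega
          refine Or.inr ⟨hbc, ?_⟩
          by_contra hlt
          exact h2 ⟨hbc.symm, lt_of_not_ge hlt⟩
    obtain ⟨ihmem, ihmin⟩ := ih (pick cs b x)
    constructor
    · rcases ihmem with h | h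
      · rcases hb.2.2 with h' | h'
        · left; rw [List.foldl_cons, h, h']
        · right; rw [List.foldl_cons, h, h']; exact List.mem_cons_self
      · right; exact List.mem_cons_of_mem _ (by simpa using h)
    · rintro c (rfl | hc)
      · exact keyle_trans cs (ihmin _ (Or.inl rfl)) hb.1
      · rcases List.mem_cons.mp hc with rfl | hc
        · exact keyle_trans cs (ihmin _ (Or.inl rfl)) hb.2.1
        · exact ihmin _ (Or.inr hc)

theorem best_unique (cs : List Char) {m m' : Char}
    (h1 : KeyLe cs m m') (h2 : KeyLe cs m' m) : m = m' := by
  rcases h1 with h1 | ⟨h1, h1'⟩ <;> rcases h2 with h2 | ⟨h2, h2'⟩ <;> first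
    | omega
    | exact le_antisymm h1' h2'

-- A's inner-loop body seen as a function of the current character
def innerChar (w : String) (i : Int) (st : Int × List String) (c : Char) : Int × List String :=
  let conta : Int := (PySem.Str.count w (String.singleton c) : Int)
  if conta > st.1 then
    (conta, PySem.List.pySetD st.2 i (String.singleton c))
  else if conta == st.1 then
    if pyOrd (String.singleton c) < pyOrd (PySem.List.pyGetD st.2 i "") then
      (conta, PySem.List.pySetD st.2 i (String.singleton c))
    else st
  else st

theorem innerBody_eq (w : String) (i : Int) :
    A_Ex9_innerBody w i = fun st j => innerChar w i st (PySem.List.pyGetD w.toList j default) := by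
  funext st j
  simp only [A_Ex9_innerBody, innerChar, PySem.Str.pyGet?, PySem.Chars.pyGet?_eq_listPyGet?,
    PySem.List.pyGetD]

-- A's inner loop, after the first character, keeps state (count of best, l[i] := best)
theorem innerA_fold (word : String) (acc : List String) (k : Nat) (hk : k < acc.length) :
    ∀ (t : List Char) (b : Char),
    t.foldl (innerChar word (k : Int))
      ((word.toList.count b : Int), PySem.List.pySetD acc (k : Int) (String.singleton b))
    = ((word.toList.count (t.foldl (pick word.toList) b) : Int),
       PySem.List.pySetD acc (k : Int) (String.singleton (t.foldl (pick word.toList) b))) := by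
  intro t
  induction t with
  | nil => intro b; rfl
  | cons c t ih =>
    intro b
    rw [List.foldl_cons, List.foldl_cons]
    have hget : PySem.List.pyGetD (PySem.List.pySetD acc (k:Int) (String.singleton b)) (k:Int) "" = String.singleton b := by
      rw [PySem.List.pyGetD_pySetD_natCast acc k k _ _ hk]; simp
    have hset : PySem.List.pySetD (PySem.List.pySetD acc (k:Int) (String.singleton b)) (k:Int) (String.singleton c) = PySem.List.pySetD acc (k:Int) (String.singleton c) := by
      simp [List.set_set]
    rw [← ih (pick word.toList b c)]
    congr 1
    simp only [innerChar, str_count_singleton, ord_singleton, hget, hset]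
    unfold pick
    split_ifs with h1 h2 h3 h4 h5 <;>
      first
        | rfl
        | (exfalso;
           simp only [beq_iff_eq, Nat.cast_lt, Nat.cast_inj, gt_iff_lt, char_lt_iff, not_and, not_lt] at * <;> omega)

-- the whole inner loop over a non-empty word
theorem innerA_loop (word : String) (acc : List String) (k : Nat) (hk : k < acc.length)
    (c0 : Char) (t : List Char) (hc0 : c0 ∈ word.toList) :
    (c0 :: t).foldl (innerChar word (k : Int)) ((0 : Int), acc)
    = ((word.toList.count (t.foldl (pick word.toList) c0) : Int),
       PySem.List.pySetD acc (k : Int) (String.singleton (t.foldl (pick word.toList) c0))) := by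
  rw [List.foldl_cons]
  have hpos : 0 < word.toList.count c0 := List.count_pos_iff.mpr hc0
  have hstep : innerChar word (k : Int) ((0 : Int), acc) c0
      = ((word.toList.count c0 : Int), PySem.List.pySetD acc (k : Int) (String.singleton c0)) := by
    simp only [innerChar, str_count_singleton]
    split_ifs with h1 h2 h3 <;>
      first | rfl | (exfalso; simp only [gt_iff_lt] at h1; exact h1 (by exact_mod_cast hpos))
  rw [hstep, innerA_fold word acc k hk t c0]

-- lexicographic "at most" on (k1 ·, ·) is transitive
theorem lek_trans (k1 : Char → Int) {a b c : Char}
    (h1 : k1 a < k1 b ∨ (k1 a = k1 b ∧ a ≤ b)) (h2 : k1 b < k1 c ∨ (k1 b = k1 c ∧ b ≤ c)) :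
    k1 a < k1 c ∨ (k1 a = k1 c ∧ a ≤ c) := by
  rcases h1 with h1 | ⟨h1, h1'⟩ <;> rcases h2 with h2 | ⟨h2, h2'⟩ <;> first
    | (left; omega)
    | exact Or.inr ⟨by omega, le_trans h1' h2'⟩

-- min2? keeps the first lexicographic minimum of (k1 ·, ·)
theorem min2_cons_min (k1 : Char → Int) :
    ∀ (xs : List Char) (a m : Char),
    PySem.List.min2? (a :: xs) k1 (fun c => c) = some m →
    (m = a ∨ m ∈ xs) ∧ ∀ y, (y = a ∨ y ∈ xs) → (k1 m < k1 y ∨ (k1 m = k1 y ∧ m ≤ y)) := by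
  intro xs
  induction xs with
  | nil =>
    intro a m h
    simp [PySem.List.min2?] at h
    subst h
    refine ⟨Or.inl rfl, ?_⟩
    rintro y hy
    rcases hy with rfl | hy
    · exact Or.inr ⟨rfl, le_refl _⟩
    · simp at hy
  | cons x t ih =>
    intro a m h
    by_cases hc : (decide (k1 x < k1 a) || !decide (k1 a < k1 x) && decide (x < a)) = true
    · have hh : PySem.List.min2? (x :: t) k1 (fun c => c) = some m := by
        simp only [PySem.List.min2?, List.foldl_cons] at h ⊢
        simpa [hc] using h
      obtain ⟨hmem, hmin⟩ := ih x m hh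
      simp only [Bool.or_eq_true, Bool.and_eq_true, Bool.not_eq_eq_eq_not, Bool.not_true,
        decide_eq_true_eq, decide_eq_false_iff_not] at hc
      have hle_xa : k1 x < k1 a ∨ (k1 x = k1 a ∧ x ≤ a) := by
        rcases hc with hc | ⟨hc1, hc2⟩
        · exact Or.inl hc
        · have hxa : k1 x ≤ k1 a := by omega
          rcases lt_or_eq_of_le hxa with h' | h'
          · exact Or.inl h'
          · exact Or.inr ⟨h', le_of_lt hc2⟩
      refine ⟨?_, ?_⟩
      · rcases hmem with rfl | hmem
        · exact Or.inr List.mem_cons_self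
        · exact Or.inr (List.mem_cons_of_mem _ hmem)
      · rintro y hy
        rcases hy with rfl | hy
        · exact lek_trans k1 (hmin x (Or.inl rfl)) hle_xa
        · rcases List.mem_cons.mp hy with rfl | hy
          · exact hmin _ (Or.inl rfl)
          · exact hmin _ (Or.inr hy)
    · have hh : PySem.List.min2? (a :: t) k1 (fun c => c) = some m := by
        simp only [PySem.List.min2?, List.foldl_cons] at h ⊢
        simpa [hc] using h
      obtain ⟨hmem, hmin⟩ := ih a m hh
      simp only [Bool.or_eq_true, Bool.and_eq_true, Bool.not_eq_eq_eq_not, Bool.not_true,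
        decide_eq_true_eq, decide_eq_false_iff_not] at hc
      push Not at hc
      have hle_ax : k1 a < k1 x ∨ (k1 a = k1 x ∧ a ≤ x) := by
        obtain ⟨hc1, hc2⟩ := hc
        by_cases h' : k1 a < k1 x
        · exact Or.inl h'
        · have he : k1 a = k1 x := by omega
          refine Or.inr ⟨he, ?_⟩
          exact hc2 (by omega)
      refine ⟨?_, ?_⟩
      · rcases hmem with rfl | hmem
        · exact Or.inl rfl
        · exact Or.inr (List.mem_cons_of_mem _ hmem)
      · rintro y hy
        rcases hy with rfl | hy
        · exact hmin _ (Or.inl rfl)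
        · rcases List.mem_cons.mp hy with rfl | hy
          · exact lek_trans k1 (hmin a (Or.inl rfl)) hle_ax
          · exact hmin _ (Or.inr hy)

theorem min2_spec (k1 : Char → Int) (xs : List Char) (m : Char)
    (h : PySem.List.min2? xs k1 (fun c => c) = some m) :
    m ∈ xs ∧ ∀ y ∈ xs, k1 m < k1 y ∨ (k1 m = k1 y ∧ m ≤ y) := by
  cases xs with
  | nil => simp [PySem.List.min2?] at h
  | cons x t =>
    obtain ⟨hmem, hmin⟩ := min2_cons_min k1 t x m h
    constructor
    · rcases hmem with rfl | hmem
      · exact List.mem_cons_self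
      · exact List.mem_cons_of_mem _ hmem
    · intro y hy
      rcases List.mem_cons.mp hy with rfl | hy
      · exact hmin _ (Or.inl rfl)
      · exact hmin _ (Or.inr hy)

theorem min2_isSome (k1 : Char → Int) (xs : List Char) (hxs : xs ≠ []) :
    ∃ m, PySem.List.min2? xs k1 (fun c => c) = some m := by
  cases xs with
  | nil => exact absurd rfl hxs
  | cons x t =>
    simp only [PySem.List.min2?, List.foldl_cons]
    clear hxs
    induction t generalizing x with
    | nil => exact ⟨x, rfl⟩
    | cons y t ih =>
      rcases Bool.eq_false_or_eq_true (decide (k1 y < k1 x) || !decide (k1 x < k1 y) && decide (y < x)) with hc | hc <;>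
        [skip; skip] <;>
      · simp only [List.foldl_cons]
        simp only [hc, if_true, Bool.false_eq_true, if_false]
        first
          | exact ih x
          | exact ih y

-- the per-word result of A's inner loop
def gA (w : String) : String :=
  match w.toList with
  | [] => w
  | c0 :: t => String.singleton (t.foldl (pick (c0 :: t)) c0)

-- setting at the border of a prefix
theorem set_at_prefix {α : Type} (A : List α) (x v : α) (R : List α) :
    (A ++ x :: R).set A.length v = A ++ v :: R := by
  induction A with
  | nil => rfl
  | cons a A ih => simp [List.set_cons_succ, ih]

theorem set_at_prefix' {α : Type} {n : Nat} (A : List α) (hA : A.length = n) (x v : α) (R : List α) :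
    (A ++ x :: R).set n v = A ++ v :: R := by
  subst hA; exact set_at_prefix A x v R

-- each word maps to B's per-word value
theorem gA_eq_alt (w : String) :
    gA w = (if w = "" then w
      else
        let counts : PySem.Dict Char Int :=
          w.toList.foldl (fun d ch => d.insert ch (d.getD ch 0 + 1)) PySem.Dict.empty
        match PySem.List.min2? counts.keys (fun c => -(counts.getD c 0)) (fun c => c) with
        | some c => String.singleton c
        | none => w) := by
  by_cases hw : w = ""
  · subst hw; rfl
  · have hcs : w.toList ≠ [] := by simp [hw]
    obtain ⟨c0, t, hw'⟩ : ∃ c0 t, w.toList = c0 :: t := by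
      cases h : w.toList with
      | nil => exact absurd h hcs
      | cons a b => exact ⟨a, b, rfl⟩
    rw [if_neg hw]
    simp only [PySem.Dict.foldl_insert_getD_add_one_eq_counter]
    have hkeys : (PySem.Dict.counter w.toList).keys = PySem.Set.ofList w.toList :=
      PySem.Dict.keys_counter _
    have hne : (PySem.Dict.counter w.toList).keys ≠ [] := by
      rw [hkeys]
      exact List.ne_nil_of_mem ((PySem.Set.mem_ofList _ _).mpr (by rw [hw']; exact List.mem_cons_self))
    obtain ⟨m, hm⟩ := min2_isSome (fun c => -((PySem.Dict.counter w.toList).getD c 0)) _ hne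
    rw [hm]
    obtain ⟨hmmem, hmmin⟩ := min2_spec _ _ m hm
    have hmcs : m ∈ w.toList := (PySem.Set.mem_ofList _ _).mp (hkeys ▸ hmmem)
    have hminle : ∀ y ∈ w.toList, KeyLe w.toList m y := by
      intro y hy
      have hly := hmmin y (by rw [hkeys]; exact (PySem.Set.mem_ofList _ _).mpr hy)
      simp only [PySem.Dict.getD_counter, neg_lt_neg_iff, neg_inj, Nat.cast_lt, Nat.cast_inj] at hly
      unfold KeyLe
      rcases hly with h | ⟨h1, h2⟩
      · exact Or.inl (by omega)
      · exact Or.inr ⟨by omega, h2⟩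
    have hA := pick_spec w.toList t c0
    have hc0 : c0 ∈ w.toList := by rw [hw']; exact List.mem_cons_self
    have hmemt : ∀ x, x ∈ t → x ∈ w.toList := by
      intro x hx; rw [hw']; exact List.mem_cons_of_mem _ hx
    have hBmem : t.foldl (pick w.toList) c0 ∈ w.toList := by
      rcases hA.1 with h | h
      · rw [h]; exact hc0
      · exact hmemt _ h
    have hBle : KeyLe w.toList (t.foldl (pick w.toList) c0) m := by
      apply hA.2
      rw [hw'] at hmcs
      rcases List.mem_cons.mp hmcs with h | h
      · exact Or.inl h
      · exact Or.inr h
    have hEq : t.foldl (pick w.toList) c0 = m :=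
      best_unique w.toList hBle (hminle _ hBmem)
    have hEq' : t.foldl (pick (c0 :: t)) c0 = m := by rw [← hw']; exact hEq
    unfold gA
    rw [hw']
    exact congrArg String.singleton hEq'

-- one outer-loop iteration replaces l[i] by gA l[i]
theorem body_step (acc : List String) (n : Nat) (hn : n < acc.length) :
    A_Ex9_outerBody acc (n : Int) = acc.set n (gA (acc.getD n "")) := by
  have hpar : PySem.List.pyGetD acc (n : Int) "" = acc.getD n "" := by
    simp [PySem.List.pyGetD_natCast]
  set w := acc.getD n "" with hwdef
  simp only [A_Ex9_outerBody, hpar]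
  rw [innerBody_eq w (n : Int)]
  have hlen : PySem.Str.len w = (w.toList.length : Int) := rfl
  rw [hlen, PySem.List.foldl_pyRange_zero_pyGetD' w.toList default (innerChar w (n : Int)) ((0 : Int), acc)]
  cases h : w.toList with
  | nil =>
    have hgA : gA w = w := by unfold gA; rw [h]
    simp only [List.foldl_nil]
    show acc = acc.set n (gA w)
    rw [hgA, hwdef, List.getD_eq_getElem _ _ hn]
    exact (List.set_getElem_self ..).symm
  | cons c0 t =>
    rw [innerA_loop w acc n hn c0 t (by rw [h]; exact List.mem_cons_self)]
    have hgA : gA w = String.singleton (t.foldl (pick w.toList) c0) := by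
      unfold gA; rw [h]
    rw [hgA]
    simp [PySem.List.pySetD_natCast]

-- the outer loop maps gA over the list
theorem outer_aux (l : List String) : ∀ n : Nat, n ≤ l.length →
    (PySem.List.pyRange 0 (n : Int) 1).foldl A_Ex9_outerBody l = (l.take n).map gA ++ l.drop n := by
  intro n
  induction n with
  | zero => intro _; simp [PySem.List.pyRange_one_eq_nil]
  | succ n ih =>
    intro hn1
    have hn : n < l.length := by omega
    have hcast : (((n+1 : Nat)) : Int) = (n : Int) + 1 := by push_cast; ring
    rw [hcast, PySem.List.pyRange_one_succ_right (by positivity), List.foldl_append,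
      List.foldl_cons, List.foldl_nil, ih (le_of_lt hn)]
    have hlen_take : ((l.take n).map gA).length = n := by
      simp [List.length_take, Nat.min_eq_left (le_of_lt hn)]
    have hdrop : l.drop n = l[n] :: l.drop (n+1) := List.drop_eq_getElem_cons hn
    have hn' : n < ((l.take n).map gA ++ l.drop n).length := by
      rw [List.length_append, hlen_take, List.length_drop]
      omega
    rw [body_step _ n hn']
    have hgetD : ((l.take n).map gA ++ l.drop n).getD n "" = l[n] := by
      rw [List.getD_eq_getElem?_getD, List.getElem?_append_right (by rw [hlen_take]),
        hlen_take, Nat.sub_self, hdrop]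
      rfl
    rw [hgetD]
    conv_lhs => rw [hdrop]
    rw [set_at_prefix' _ hlen_take]
    have htake : l.take (n+1) = l.take n ++ [l[n]] := by
      rw [List.take_succ, List.getElem?_eq_getElem hn]
      rfl
    rw [htake, List.map_append, List.append_assoc]
    rfl

theorem main_eq (l : List String) : A_Ex9 l = A_Ex9_alt l := by
  unfold A_Ex9
  rw [outer_aux l l.length le_rfl]
  simp only [List.take_length, List.drop_length, List.append_nil]
  unfold A_Ex9_alt
  exact List.map_congr_left (fun w _ => gA_eq_alt w)

-- ===== VERDICT (by name: the statement is the Claim_ definition above) =====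
theorem A_Ex9_spec : Claim_equal_A_Ex9 := by
  intro l _
  unfold Spec_A_Ex9
  exact main_eq l
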